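-- pv_equiv track=rewrite | github.com/hi-z-k/leetcode | 0722-remove-comments/0722-remove-comments.py | removeComments
-- ===== SOURCE A (Python) =====
-- from typing import List
--
-- def removeComments(source: List[str]) -> List[str]:
--     cleaned = []
--     is_comment = False
--     cleaned_line = []
--
--     for line in source:
--         i = 0
--         while i < len(line):
--             if is_comment:
--                 if i + 1 < len(line) and line[i:i+2] == "*/":
--                     is_comment = False
--                     i += 1
--             else:
--                 if i + 1 < len(line) and line[i:i+2] == "/*":
--                     is_comment = True
--                     i += 1
--                 elif i + 1 < len(line) and line[i:i+2] == "//":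
--                     break
--                 else:
--                     cleaned_line.append(line[i])
--             i += 1
--
--         if not is_comment and cleaned_line:
--             cleaned.append("".join(cleaned_line))
--             cleaned_line = []
--
--     return cleaned
-- ===== SOURCE B (Python) =====
-- from typing import List
--
-- def removeComments(source: List[str]) -> List[str]:
--     out = []
--     buf = ""
--     in_block = False
--     for line in source:
--         i = 0
--         n = len(line)
--         while i < n:
--             if in_block:
--                 j = line.find("*/", i)
--                 if j == -1:
--                     i = n
--                 else:
--                     in_block = False
--                     i = j + 2
--             else:
--                 j1 = line.find("//", i)
--                 j2 = line.find("/*", i)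
--                 if j2 != -1 and (j1 == -1 or j2 < j1):
--                     buf += line[i:j2]
--                     in_block = True
--                     i = j2 + 2
--                 elif j1 != -1:
--                     buf += line[i:j1]
--                     i = n
--                 else:
--                     buf += line[i:]
--                     i = n
--         if not in_block and buf:
--             out.append(buf)
--             buf = ""
--     return out
-- ===== Notes on version B (the rewrite author's own statement) =====
-- stated objective: idiomatic
-- what changed: A walks every character one at a time through a state machine; B jumps from delimiter to delimiter per line using str.find for '//', '/*' and '*/' and appends whole slices, keeping the same cross-line buffer and in_block flag.
import Mathlib
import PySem

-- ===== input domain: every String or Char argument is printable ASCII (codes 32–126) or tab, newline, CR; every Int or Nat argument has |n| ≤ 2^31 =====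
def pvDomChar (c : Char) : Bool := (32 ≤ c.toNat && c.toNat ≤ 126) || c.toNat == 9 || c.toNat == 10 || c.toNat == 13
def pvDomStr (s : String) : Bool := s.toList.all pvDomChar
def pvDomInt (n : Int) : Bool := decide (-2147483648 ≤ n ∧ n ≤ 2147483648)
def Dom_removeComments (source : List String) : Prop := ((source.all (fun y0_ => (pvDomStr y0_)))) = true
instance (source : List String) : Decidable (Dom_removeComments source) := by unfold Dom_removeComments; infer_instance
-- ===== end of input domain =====

-- B replaces A's per-character state machine by per-line jumps to the next delimiter
-- found with str.find (idiomatic; return value identical on all inputs).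

-- termination measures (tiny named proofs keep the recursive definitions small)
theorem pvDecStep {n i : Nat} (h : i < n) : n - (i+1) < n - i := Nat.sub_succ_lt_self n i h
theorem pvDecTwo {n i : Nat} (h : i < n) : n - (i+2) < n - i :=
  Nat.lt_of_le_of_lt (Nat.sub_le_sub_left (Nat.le_add_right (i+1) 1) n) (pvDecStep h)
theorem pvDecJump {n i j : Nat} (hij : i ≤ j) (h : i < n) : n - (j+2) < n - i :=
  Nat.lt_of_le_of_lt (Nat.sub_le_sub_left (by exact Nat.add_le_add_right (Nat.le_trans hij (Nat.le_add_right j 1)) 1) n) (pvDecStep h)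
theorem pvDecEnd {n i : Nat} (h : i < n) : n - n < n - i := by
  rw [Nat.sub_self]; exact Nat.sub_pos_of_lt h

-- ===== PORT A =====
-- A's inner while loop: index i over the chars of one line, state (is_comment, cleaned_line).
def aLoop (l : List Char) (i : Nat) (isC : Bool) (acc : List Char) : Bool × List Char :=
  if i < l.length then
    if isC then
      if i + 1 < l.length ∧ l.getD i ' ' = '*' ∧ l.getD (i+1) ' ' = '/' then
        aLoop l (i+2) false acc
      else aLoop l (i+1) true acc
    else
      if i + 1 < l.length ∧ l.getD i ' ' = '/' ∧ l.getD (i+1) ' ' = '*' then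
        aLoop l (i+2) true acc
      else if i + 1 < l.length ∧ l.getD i ' ' = '/' ∧ l.getD (i+1) ' ' = '/' then
        (isC, acc)  -- break
      else aLoop l (i+1) isC (acc ++ [l.getD i ' '])
  else (isC, acc)
termination_by l.length - i
decreasing_by
  · exact pvDecTwo (by omega)
  · exact pvDecStep (by omega)
  · exact pvDecTwo (by omega)
  · exact pvDecStep (by omega)

def removeComments (source : List String) : List String :=
  (source.foldl
    (fun st line =>
      let r := aLoop line.toList 0 st.2.1 st.2.2
      if r.1 = false ∧ r.2 ≠ [] then (st.1 ++ [String.mk r.2], r.1, ([] : List Char))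
      else (st.1, r.1, r.2))
    (([] : List String), false, ([] : List Char))).1

-- ===== PORT B =====
-- hand port of Python's line.find(c1 ++ c2, i) for a two-char pattern (exact: first
-- index ≥ i where both chars match, none when absent).
def find2 (l : List Char) (c1 c2 : Char) (i : Nat) : Option Nat :=
  if i + 1 < l.length then
    if l.getD i ' ' = c1 ∧ l.getD (i+1) ' ' = c2 then some i
    else find2 l c1 c2 (i+1)
  else none
termination_by l.length - i
decreasing_by exact pvDecStep (by omega)

theorem find2_ge {l : List Char} {c1 c2 : Char} {i j : Nat}
    (h : find2 l c1 c2 i = some j) :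
    i ≤ j ∧ j + 1 < l.length ∧ l.getD j ' ' = c1 ∧ l.getD (j+1) ' ' = c2 := by
  fun_induction find2 l c1 c2 i with
  | case1 i hlt hm => cases h; exact ⟨le_refl _, hlt, hm⟩
  | case2 i hlt hm ih =>
      have := ih h
      exact ⟨Nat.le_of_succ_le this.1, this.2⟩
  | case3 i hlt => cases h

-- B's inner while loop: jump from delimiter to delimiter.
def bLoop (l : List Char) (i : Nat) (inB : Bool) (buf : List Char) : Bool × List Char :=
  if i < l.length then
    if inB then
      match hj : find2 l '*' '/' i with
      | none => bLoop l l.length inB buf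
      | some j => bLoop l (j+2) false buf
    else
      match hj2 : find2 l '/' '*' i, hj1 : find2 l '/' '/' i with
      | some j, none => bLoop l (j+2) true (buf ++ l.extract i j)
      | some j, some k =>
          if j < k then bLoop l (j+2) true (buf ++ l.extract i j)
          else bLoop l l.length inB (buf ++ l.extract i k)
      | none, some k => bLoop l l.length inB (buf ++ l.extract i k)
      | none, none => bLoop l l.length inB (buf ++ l.extract i l.length)
  else (inB, buf)
termination_by l.length - i
decreasing_by
  · exact pvDecEnd (by omega)
  · exact pvDecJump (find2_ge hj).1 (by omega)
  · exact pvDecJump (find2_ge hj2).1 (by omega)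
  · exact pvDecJump (find2_ge hj2).1 (by omega)
  · exact pvDecEnd (by omega)
  · exact pvDecEnd (by omega)
  · exact pvDecEnd (by omega)

def removeComments_alt (source : List String) : List String :=
  (source.foldl
    (fun st line =>
      let r := bLoop line.toList 0 st.2.1 st.2.2
      if r.1 = false ∧ r.2 ≠ [] then (st.1 ++ [String.mk r.2], r.1, ([] : List Char))
      else (st.1, r.1, r.2))
    (([] : List String), false, ([] : List Char))).1

-- ===== PRECONDITION & SPEC =====
def Spec_removeComments (source : List String) (out : List String) : Prop := out = removeComments_alt source
instance (source : List String) (out : List String) : Decidable (Spec_removeComments source out) := by unfold Spec_removeComments; infer_instance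

-- ===== CLAIM (what is proved, stated in full; the proofs are below) =====
def Claim_equal_removeComments : Prop := ∀ (source : List String), Dom_removeComments source → Spec_removeComments source (removeComments source)

-- ===== LEMMAS AND PROOFS =====

theorem if_false_bool {A : Sort u} (a b : A) : (if (false = true) then a else b) = b := by simp

-- stepping find2 past a non-matching position
theorem find2_step {l : List Char} {c1 c2 : Char} {i : Nat}
    (h : ¬ (i + 1 < l.length ∧ l.getD i ' ' = c1 ∧ l.getD (i+1) ' ' = c2)) :
    find2 l c1 c2 i = find2 l c1 c2 (i+1) := by
  rw [find2]
  by_cases hlt : i + 1 < l.length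
  · rw [if_pos hlt]
    have hm : ¬ (l.getD i ' ' = c1 ∧ l.getD (i+1) ' ' = c2) := fun hm => h ⟨hlt, hm⟩
    rw [if_neg hm]
  · rw [if_neg hlt, find2]
    have h2 : ¬ (i + 1 + 1 < l.length) := by omega
    rw [if_neg h2]

theorem find2_none_of_end {l : List Char} {c1 c2 : Char} {i : Nat}
    (h : ¬ (i + 1 < l.length)) : find2 l c1 c2 i = none := by
  rw [find2, if_neg h]

theorem find2_hit {l : List Char} {c1 c2 : Char} {i : Nat}
    (h : i + 1 < l.length ∧ l.getD i ' ' = c1 ∧ l.getD (i+1) ' ' = c2) :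
    find2 l c1 c2 i = some i := by
  rw [find2, if_pos h.1, if_pos h.2]

theorem extract_cons {l : List Char} {i j : Nat} (hi : i < l.length) (hij : i < j) :
    l.extract i j = l.getD i ' ' :: l.extract (i+1) j := by
  have hg : l.getD i ' ' = l[i] := List.getD_eq_getElem l ' ' hi
  rw [hg]
  simp only [List.extract_eq_take_drop]
  rw [List.drop_eq_getElem_cons hi]
  have hji : j - i = (j - (i+1)) + 1 := by omega
  rw [hji, List.take_succ_cons]

theorem extract_nil {l : List Char} {i : Nat} : l.extract i i = [] := by
  simp [List.extract_eq_take_drop]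

theorem extract_end_nil {l : List Char} {i : Nat} (h : ¬ i + 1 < l.length) :
    l.extract (i+1) l.length = [] := by
  simp only [List.extract_eq_take_drop]
  rw [List.drop_eq_nil_of_le (by omega)]
  simp

-- base case of bLoop at or past the end
theorem bLoop_end {l : List Char} {i : Nat} (h : ¬ i < l.length) (inB : Bool) (buf : List Char) :
    bLoop l i inB buf = (inB, buf) := by
  rw [bLoop, if_neg h]

-- one-step unfolding lemmas for bLoop, by the shape of the find2 results
theorem bLoop_true_none {l : List Char} {i : Nat} (buf : List Char)
    (hi : i < l.length) (h : find2 l '*' '/' i = none) :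
    bLoop l i true buf = (true, buf) := by
  rw [bLoop, if_pos hi, if_pos rfl]
  split <;> rename_i hj <;> rw [h] at hj <;> cases hj
  exact bLoop_end (by omega) true buf

theorem bLoop_true_some {l : List Char} {i j : Nat} (buf : List Char)
    (hi : i < l.length) (h : find2 l '*' '/' i = some j) :
    bLoop l i true buf = bLoop l (j+2) false buf := by
  rw [bLoop, if_pos hi, if_pos rfl]
  split <;> rename_i hj <;> rw [h] at hj <;> cases hj <;> rfl

theorem bLoop_false_nn {l : List Char} {i : Nat} (buf : List Char)
    (hi : i < l.length) (h2 : find2 l '/' '*' i = none) (h1 : find2 l '/' '/' i = none) :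
    bLoop l i false buf = (false, buf ++ l.extract i l.length) := by
  rw [bLoop, if_pos hi, if_false_bool]
  split <;> rename_i hj2 hj1 <;> rw [h2] at hj2 <;> rw [h1] at hj1 <;>
    cases hj2 <;> cases hj1
  exact bLoop_end (by omega) false _

theorem bLoop_false_ns {l : List Char} {i k : Nat} (buf : List Char)
    (hi : i < l.length) (h2 : find2 l '/' '*' i = none) (h1 : find2 l '/' '/' i = some k) :
    bLoop l i false buf = (false, buf ++ l.extract i k) := by
  rw [bLoop, if_pos hi, if_false_bool]
  split <;> rename_i hj2 hj1 <;> rw [h2] at hj2 <;> rw [h1] at hj1 <;>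
    cases hj2 <;> cases hj1
  exact bLoop_end (by omega) false _

theorem bLoop_false_sn {l : List Char} {i j : Nat} (buf : List Char)
    (hi : i < l.length) (h2 : find2 l '/' '*' i = some j) (h1 : find2 l '/' '/' i = none) :
    bLoop l i false buf = bLoop l (j+2) true (buf ++ l.extract i j) := by
  rw [bLoop, if_pos hi, if_false_bool]
  split <;> rename_i hj2 hj1 <;> rw [h2] at hj2 <;> rw [h1] at hj1 <;>
    cases hj2 <;> cases hj1
  rfl

theorem bLoop_false_ss {l : List Char} {i j k : Nat} (buf : List Char)
    (hi : i < l.length) (h2 : find2 l '/' '*' i = some j) (h1 : find2 l '/' '/' i = some k) :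
    bLoop l i false buf =
      (if j < k then bLoop l (j+2) true (buf ++ l.extract i j)
       else (false, buf ++ l.extract i k)) := by
  rw [bLoop, if_pos hi, if_false_bool]
  split <;> rename_i hj2 hj1 <;> rw [h2] at hj2 <;> rw [h1] at hj1 <;>
    cases hj2 <;> cases hj1
  by_cases hjk : j < k
  · rw [if_pos hjk, if_pos hjk]
  · rw [if_neg hjk, if_neg hjk]
    exact bLoop_end (by omega) false _

-- step lemma for bLoop while in a block comment, no "*/" at position i
theorem bLoop_stepC {l : List Char} {i : Nat} (buf : List Char)
    (hm : ¬ (i + 1 < l.length ∧ l.getD i ' ' = '*' ∧ l.getD (i+1) ' ' = '/')) :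
    bLoop l i true buf = bLoop l (i+1) true buf := by
  by_cases hi : i < l.length
  · by_cases hi1 : i + 1 < l.length
    · cases hj : find2 l '*' '/' (i+1) with
      | none =>
          rw [bLoop_true_none buf hi ((find2_step hm).trans hj),
              bLoop_true_none buf hi1 hj]
      | some j =>
          rw [bLoop_true_some buf hi ((find2_step hm).trans hj),
              bLoop_true_some buf hi1 hj]
    · rw [bLoop_true_none buf hi ((find2_step hm).trans (find2_none_of_end (by omega))),
          bLoop_end hi1]
  · rw [bLoop_end hi, bLoop_end (by omega)]

-- step lemma for bLoop outside comments, no delimiter starting at position i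
theorem bLoop_stepN {l : List Char} {i : Nat} (buf : List Char) (hi : i < l.length)
    (hb : ¬ (i + 1 < l.length ∧ l.getD i ' ' = '/' ∧ l.getD (i+1) ' ' = '*'))
    (hsl : ¬ (i + 1 < l.length ∧ l.getD i ' ' = '/' ∧ l.getD (i+1) ' ' = '/')) :
    bLoop l i false buf = bLoop l (i+1) false (buf ++ [l.getD i ' ']) := by
  by_cases hi1 : i + 1 < l.length
  · cases hj2 : find2 l '/' '*' (i+1) with
    | some j =>
      have hij : i < j := by have := (find2_ge hj2).1; omega
      cases hj1 : find2 l '/' '/' (i+1) with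
      | none =>
          rw [bLoop_false_sn buf hi ((find2_step hb).trans hj2) ((find2_step hsl).trans hj1),
              bLoop_false_sn (buf ++ [l.getD i ' ']) hi1 hj2 hj1]
          rw [extract_cons hi hij]; simp
      | some k =>
          have hik : i < k := by have := (find2_ge hj1).1; omega
          rw [bLoop_false_ss buf hi ((find2_step hb).trans hj2) ((find2_step hsl).trans hj1),
              bLoop_false_ss (buf ++ [l.getD i ' ']) hi1 hj2 hj1]
          by_cases hjk : j < k
          · rw [if_pos hjk, if_pos hjk, extract_cons hi hij]; simp
          · rw [if_neg hjk, if_neg hjk, extract_cons hi hik]; simp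
    | none =>
      cases hj1 : find2 l '/' '/' (i+1) with
      | none =>
          rw [bLoop_false_nn buf hi ((find2_step hb).trans hj2) ((find2_step hsl).trans hj1),
              bLoop_false_nn (buf ++ [l.getD i ' ']) hi1 hj2 hj1]
          rw [extract_cons hi (by omega : i < l.length)]; simp
      | some k =>
          have hik : i < k := by have := (find2_ge hj1).1; omega
          rw [bLoop_false_ns buf hi ((find2_step hb).trans hj2) ((find2_step hsl).trans hj1),
              bLoop_false_ns (buf ++ [l.getD i ' ']) hi1 hj2 hj1]
          rw [extract_cons hi hik]; simp
  · rw [bLoop_false_nn buf hi ((find2_step hb).trans (find2_none_of_end (by omega)))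
        ((find2_step hsl).trans (find2_none_of_end (by omega))),
        bLoop_end hi1]
    rw [extract_cons hi (by omega : i < l.length), extract_end_nil hi1]

-- the key equivalence of the two inner loops
theorem loop_eq (l : List Char) (i : Nat) (isC : Bool) (acc : List Char) :
    aLoop l i isC acc = bLoop l i isC acc := by
  by_cases hi : i < l.length
  · cases isC with
    | true =>
      by_cases hm : i + 1 < l.length ∧ l.getD i ' ' = '*' ∧ l.getD (i+1) ' ' = '/'
      · -- "*/" at i : both jump to i+2, leaving the block
        rw [aLoop, if_pos hi, if_pos rfl, if_pos hm,
            bLoop_true_some acc hi (find2_hit hm)]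
        exact loop_eq l (i+2) false acc
      · -- no "*/" at i : A steps to i+1; B's find skips position i
        rw [aLoop, if_pos hi, if_pos rfl, if_neg hm,
            loop_eq l (i+1) true acc]
        exact (bLoop_stepC acc hm).symm
    | false =>
      by_cases hb : i + 1 < l.length ∧ l.getD i ' ' = '/' ∧ l.getD (i+1) ' ' = '*'
      · -- "/*" at i : block comment opens, the empty slice before it is appended
        rw [aLoop, if_pos hi, if_false_bool, if_pos hb]
        cases hk : find2 l '/' '/' i with
        | none =>
            rw [bLoop_false_sn acc hi (find2_hit hb) hk]
            rw [extract_nil, List.append_nil]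
            exact loop_eq l (i+2) true acc
        | some k =>
            have hik : i < k := by
              have h1 := find2_ge hk
              rcases Nat.eq_or_lt_of_le h1.1 with heq | hlt
              · exfalso
                rw [← heq] at h1
                have hc := h1.2.2.2
                rw [hb.2.2] at hc
                exact absurd hc (by decide)
              · exact hlt
            rw [bLoop_false_ss acc hi (find2_hit hb) hk]
            rw [if_pos hik, extract_nil, List.append_nil]
            exact loop_eq l (i+2) true acc
      · by_cases hsl : i + 1 < l.length ∧ l.getD i ' ' = '/' ∧ l.getD (i+1) ' ' = '/'
        · -- "//" at i : A breaks; B takes the empty prefix and ends the line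
          rw [aLoop, if_pos hi, if_false_bool, if_neg hb, if_pos hsl]
          cases hj : find2 l '/' '*' i with
          | none =>
              rw [bLoop_false_ns acc hi hj (find2_hit hsl)]
              rw [extract_nil, List.append_nil]
          | some j =>
              have hji : i < j := by
                have h1 := find2_ge hj
                rcases Nat.eq_or_lt_of_le h1.1 with heq | hlt
                · exfalso
                  rw [← heq] at h1
                  have hc := h1.2.2.2
                  rw [hsl.2.2] at hc
                  exact absurd hc (by decide)
                · exact hlt
              rw [bLoop_false_ss acc hi hj (find2_hit hsl)]
              rw [if_neg (by omega : ¬ j < i), extract_nil, List.append_nil]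
        · -- ordinary character at i : A appends it; B's slices absorb it
          rw [aLoop, if_pos hi, if_false_bool, if_neg hb, if_neg hsl,
              loop_eq l (i+1) false (acc ++ [l.getD i ' '])]
          exact (bLoop_stepN acc hi hb hsl).symm
  · rw [aLoop, if_neg hi, bLoop_end hi]
termination_by l.length - i
decreasing_by all_goals omega

theorem fold_eq (source : List String) (st : List String × Bool × List Char) :
    source.foldl
      (fun st line =>
        let r := aLoop line.toList 0 st.2.1 st.2.2
        if r.1 = false ∧ r.2 ≠ [] then (st.1 ++ [String.mk r.2], r.1, ([] : List Char))
        else (st.1, r.1, r.2)) st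
    = source.foldl
      (fun st line =>
        let r := bLoop line.toList 0 st.2.1 st.2.2
        if r.1 = false ∧ r.2 ≠ [] then (st.1 ++ [String.mk r.2], r.1, ([] : List Char))
        else (st.1, r.1, r.2)) st := by
  induction source generalizing st with
  | nil => rfl
  | cons line rest ih =>
      simp only [List.foldl_cons]
      rw [loop_eq]
      exact ih _

-- ===== VERDICT (by name: the statement is the Claim_ definition above) =====
theorem removeComments_spec : Claim_equal_removeComments := by
  intro source _
  unfold Spec_removeComments removeComments removeComments_alt
  rw [fold_eq]
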